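-- pv_equiv track=rewrite | github.com/lautaro165/proyecto-copa-algoritmia | funciones.py | normalizar_marcadores
-- ===== SOURCE A (Python) =====
-- def normalizar_marcadores(texto):
--     reemplazos = {
--         "(pais)": "*pais*",
--         "(capital)": "*capital*",
--         "(continente)": "*continente*"
--     }
--
--     for key, value in reemplazos.items():
--         texto = texto.replace(key, value)
--
--     return texto
-- ===== SOURCE B (Python) =====
-- def normalizar_marcadores(texto):
--     reemplazos = (
--         ("(pais)", "*pais*"),
--         ("(capital)", "*capital*"),
--         ("(continente)", "*continente*"),
--     )
--     out = []
--     i = 0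
--     n = len(texto)
--     while i < n:
--         for key, value in reemplazos:
--             if texto.startswith(key, i):
--                 out.append(value)
--                 i += len(key)
--                 break
--         else:
--             out.append(texto[i])
--             i += 1
--     return "".join(out)
-- ===== Notes on version B (the rewrite author's own statement) =====
-- stated objective: alternative
-- what changed: Replaces A's three sequential full-string replace() passes by a single left-to-right scan that tries the three markers at each position and emits the replacement or the current character.
import Mathlib
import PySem

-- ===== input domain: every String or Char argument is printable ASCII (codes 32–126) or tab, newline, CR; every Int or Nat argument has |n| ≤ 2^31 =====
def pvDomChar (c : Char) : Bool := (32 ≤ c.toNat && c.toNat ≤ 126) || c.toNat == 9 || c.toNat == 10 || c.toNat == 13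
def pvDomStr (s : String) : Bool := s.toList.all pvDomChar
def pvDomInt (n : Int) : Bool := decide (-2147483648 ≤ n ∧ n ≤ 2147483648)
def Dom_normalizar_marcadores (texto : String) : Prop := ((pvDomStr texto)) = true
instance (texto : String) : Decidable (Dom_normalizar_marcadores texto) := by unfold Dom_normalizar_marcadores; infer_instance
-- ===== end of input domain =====

-- B replaces A's three sequential full-string replace() passes by a single left-to-right
-- scan that matches the three markers at each position (alternative decomposition, same result).

-- ===== PORT A =====
def normalizar_marcadores (texto : String) : String :=
  let reemplazos : PySem.Dict String String :=
    (((PySem.Dict.empty).insert "(pais)" "*pais*").insert "(capital)" "*capital*").insert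
      "(continente)" "*continente*"
  reemplazos.items.foldl (fun t kv => PySem.Str.replace t kv.1 kv.2) texto

-- ===== PORT B =====
-- the three (key, value) pairs of Source B's `reemplazos` tuple, as char lists
def pvT1 : List Char := ['p','a','i','s',')']
def pvT2 : List Char := ['c','a','p','i','t','a','l',')']
def pvT3 : List Char := ['c','o','n','t','i','n','e','n','t','e',')']
def pvU1 : List Char := ['p','a','i','s','*']
def pvU2 : List Char := ['c','a','p','i','t','a','l','*']
def pvU3 : List Char := ['c','o','n','t','i','n','e','n','t','e','*']
def pvK1 : List Char := '(' :: pvT1       -- "(pais)"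
def pvV1 : List Char := '*' :: pvU1       -- "*pais*"
def pvK2 : List Char := '(' :: pvT2       -- "(capital)"
def pvV2 : List Char := '*' :: pvU2       -- "*capital*"
def pvK3 : List Char := '(' :: pvT3       -- "(continente)"
def pvV3 : List Char := '*' :: pvU3       -- "*continente*"

-- Source B's while-loop: one left-to-right scan over the remaining text, trying the three
-- keys in order at the current position; on a match emit the value and skip the key,
-- otherwise emit the current character and advance by one.
def pvScan : List Char → List Char
  | [] => []
  | c :: t =>
    if pvK1.isPrefixOf (c :: t) then pvV1 ++ pvScan (t.drop 5)
    else if pvK2.isPrefixOf (c :: t) then pvV2 ++ pvScan (t.drop 8)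
    else if pvK3.isPrefixOf (c :: t) then pvV3 ++ pvScan (t.drop 11)
    else c :: pvScan t
termination_by l => l.length
decreasing_by all_goals simp [List.length_drop]

def normalizar_marcadores_alt (texto : String) : String :=
  String.ofList (pvScan texto.toList)

-- ===== PRECONDITION & SPEC =====
def Spec_normalizar_marcadores (texto : String) (out : String) : Prop := out = normalizar_marcadores_alt texto
instance (texto : String) (out : String) : Decidable (Spec_normalizar_marcadores texto out) := by unfold Spec_normalizar_marcadores; infer_instance

-- ===== CLAIM (what is proved, stated in full; the proofs are below) =====
def Claim_equal_normalizar_marcadores : Prop := ∀ (texto : String), Dom_normalizar_marcadores texto → Spec_normalizar_marcadores texto (normalizar_marcadores texto)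

-- ===== LEMMAS AND PROOFS =====

-- One pass of Python's str.replace for a nonempty key, as a plain structural recursion.
def pvRepl (k0 : Char) (ks v : List Char) : List Char → List Char
  | [] => []
  | c :: t =>
    if (k0 :: ks).isPrefixOf (c :: t) then v ++ pvRepl k0 ks v (t.drop ks.length)
    else c :: pvRepl k0 ks v t
termination_by l => l.length
decreasing_by all_goals simp [List.length_drop]

theorem pvRepl_match (k0 : Char) (ks v : List Char) (c : Char) (t : List Char)
    (h : (k0 :: ks).isPrefixOf (c :: t) = true) :
    pvRepl k0 ks v (c :: t) = v ++ pvRepl k0 ks v (t.drop ks.length) := by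
  rw [pvRepl]; simp [h]

theorem pvRepl_skip (k0 : Char) (ks v : List Char) (c : Char) (t : List Char)
    (h : ¬ (k0 :: ks).isPrefixOf (c :: t) = true) :
    pvRepl k0 ks v (c :: t) = c :: pvRepl k0 ks v t := by
  rw [pvRepl]; simp [h]

theorem pvRepl_go (k0 : Char) (ks v : List Char) :
    ∀ fuel l acc, l.length ≤ fuel →
      PySem.Chars.replace.go (k0 :: ks) v fuel l acc = acc.reverse ++ pvRepl k0 ks v l := by
  intro fuel
  induction fuel with
  | zero =>
    intro l acc h
    have : l = [] := by
      cases l with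
      | nil => rfl
      | cons a t => simp at h
    subst this
    rw [PySem.Chars.replace.go.eq_def]
    simp [pvRepl]
  | succ fuel ih =>
    intro l acc h
    cases l with
    | nil =>
      rw [PySem.Chars.replace.go.eq_def]
      simp [pvRepl]
    | cons c t =>
      rw [PySem.Chars.replace.go.eq_def]
      simp only []
      by_cases hp : (k0 :: ks).isPrefixOf (c :: t) = true
      · simp only [hp, if_pos]
        rw [ih _ _ (by simp at h ⊢; omega)]
        rw [pvRepl_match k0 ks v c t hp]
        simp
      · simp only [hp, if_neg, Bool.false_eq_true, not_false_iff]
        rw [ih _ _ (by simp at h ⊢; omega)]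
        rw [pvRepl_skip k0 ks v c t hp]
        simp

theorem replace_eq_pvRepl (k0 : Char) (ks v l : List Char) :
    PySem.Chars.replace l (k0 :: ks) v = pvRepl k0 ks v l := by
  rw [PySem.Chars.replace.eq_def]
  simp [pvRepl_go k0 ks v l.length l [] le_rfl]


theorem pvRepl_skip' (k0 : Char) (ks v : List Char) (c : Char) (t : List Char)
    (h : c ≠ k0) :
    pvRepl k0 ks v (c :: t) = c :: pvRepl k0 ks v t := by
  apply pvRepl_skip
  intro hpre
  rcases List.isPrefixOf_iff_prefix.mp hpre with ⟨r, hr⟩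
  exact h (by injection hr with h1 _; exact h1.symm) |>.elim

theorem pvRepl_append (k0 : Char) (ks v : List Char) (p x : List Char)
    (hp : ∀ c ∈ p, c ≠ k0) :
    pvRepl k0 ks v (p ++ x) = p ++ pvRepl k0 ks v x := by
  induction p with
  | nil => simp
  | cons a p ih =>
    simp only [List.cons_append]
    rw [pvRepl_skip' k0 ks v a _ (hp a (by simp))]
    rw [ih (fun c hc => hp c (by simp [hc]))]

-- prefix reflection: a word containing neither the key's first char nor the value's
-- first char is a prefix of the output of one replace pass iff it is a prefix of its input
theorem pvRepl_prefix_iff (k0 : Char) (ks : List Char) (v0 : Char) (vs : List Char) :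
    ∀ t w, (∀ c ∈ w, c ≠ k0 ∧ c ≠ v0) →
      (w <+: pvRepl k0 ks (v0 :: vs) t ↔ w <+: t) := by
  intro t
  induction t with
  | nil => intro w _; simp [pvRepl]
  | cons c t ih =>
    intro w hw
    cases w with
    | nil => simp
    | cons a w' =>
      have ha := hw a (by simp)
      by_cases hp : (k0 :: ks).isPrefixOf (c :: t) = true
      · have hck : c = k0 := by
          rcases List.isPrefixOf_iff_prefix.mp hp with ⟨r, hr⟩
          injection hr with h1 _; exact h1.symm
        rw [pvRepl_match k0 ks (v0 :: vs) c t hp]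
        simp only [List.cons_append, List.cons_prefix_cons]
        constructor
        · rintro ⟨h1, -⟩; exact absurd h1 ha.2
        · rintro ⟨h1, -⟩; rw [hck] at h1; exact absurd h1 ha.1
      · rw [pvRepl_skip k0 ks (v0 :: vs) c t hp]
        simp only [List.cons_prefix_cons]
        exact and_congr_right fun _ => ih w' (fun x hx => hw x (by simp [hx]))

theorem pvNotPrefixK2K3 (X : List Char) :
    ¬ ('(' :: pvT2).isPrefixOf ('(' :: (pvT3 ++ X)) = true := by
  intro h
  have h' := (List.isPrefixOf_iff_prefix.mp h)
  rw [List.cons_prefix_cons] at h'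
  have h2 := h'.2
  rw [show pvT2 = 'c'::'a'::'p'::'i'::'t'::'a'::'l'::')'::([]:List Char) from rfl,
     show pvT3 ++ X = 'c'::'o'::'n'::'t'::'i'::'n'::'e'::'n'::'t'::'e'::')'::X from rfl] at h2
  simp [List.cons_prefix_cons] at h2

-- ===== the main list-level equivalence =====

theorem pvChain_eq_pvScan :
    ∀ n l, List.length l ≤ n →
      pvRepl '(' pvT3 pvV3
        (pvRepl '(' pvT2 pvV2
          (pvRepl '(' pvT1 pvV1 l)) = pvScan l := by
  intro n
  induction n with
  | zero =>
    intro l h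
    have : l = [] := by cases l with | nil => rfl | cons a t => simp at h
    subst this
    simp [pvRepl, pvScan]
  | succ n ih =>
    intro l hl
    cases l with
    | nil => simp [pvRepl, pvScan]
    | cons c t =>
      by_cases h1 : pvK1.isPrefixOf (c :: t) = true
      · -- the first marker matches here
        rw [pvRepl_match '(' pvT1 pvV1 c t h1]
        rw [show (pvT1).length = 5 from rfl]
        rw [pvRepl_append '(' pvT2 pvV2 pvV1 _ (by intro c hc; fin_cases hc <;> decide)]
        rw [pvRepl_append '(' pvT3 pvV3 pvV1 _ (by intro c hc; fin_cases hc <;> decide)]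
        rw [ih (t.drop 5) (by simp at hl ⊢; omega)]
        rw [pvScan]; simp only [h1, if_pos]
      · by_cases h2 : pvK2.isPrefixOf (c :: t) = true
        · -- the second marker matches here
          have hpre := List.isPrefixOf_iff_prefix.mp h2
          rw [show pvK2 = '(' :: pvT2 from rfl, List.cons_prefix_cons] at hpre
          obtain ⟨hc, rest, hrest⟩ := hpre
          subst hc; subst hrest
          rw [pvRepl_skip '(' pvT1 pvV1 _ _ h1]
          rw [pvRepl_append '(' pvT1 pvV1 pvT2 _ (by intro c hc; fin_cases hc <;> decide)]
          rw [pvRepl_match '(' pvT2 pvV2 '(' _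
            (List.isPrefixOf_iff_prefix.mpr (List.cons_prefix_cons.mpr ⟨rfl, List.prefix_append _ _⟩))]
          rw [List.drop_left]
          rw [pvRepl_append '(' pvT3 pvV3 pvV2 _ (by intro c hc; fin_cases hc <;> decide)]
          rw [ih rest (by simp at hl ⊢; omega)]
          rw [pvScan]; simp only [h1, h2, if_pos, Bool.false_eq_true, if_neg, not_false_iff]
          rw [List.drop_left' (show (pvT2).length = 8 from rfl)]
        · by_cases h3 : pvK3.isPrefixOf (c :: t) = true
          · -- the third marker matches here
            have hpre := List.isPrefixOf_iff_prefix.mp h3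
            rw [show pvK3 = '(' :: pvT3 from rfl, List.cons_prefix_cons] at hpre
            obtain ⟨hc, rest, hrest⟩ := hpre
            subst hc; subst hrest
            rw [pvRepl_skip '(' pvT1 pvV1 _ _ h1]
            rw [pvRepl_append '(' pvT1 pvV1 pvT3 _ (by intro c hc; fin_cases hc <;> decide)]
            rw [pvRepl_skip '(' pvT2 pvV2 _ _ (pvNotPrefixK2K3 _)]
            rw [pvRepl_append '(' pvT2 pvV2 pvT3 _ (by intro c hc; fin_cases hc <;> decide)]
            rw [pvRepl_match '(' pvT3 pvV3 '(' _
              (List.isPrefixOf_iff_prefix.mpr (List.cons_prefix_cons.mpr ⟨rfl, List.prefix_append _ _⟩))]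
            rw [List.drop_left]
            rw [ih rest (by simp at hl ⊢; omega)]
            rw [pvScan]
            simp only [h1, h2, h3, if_pos, Bool.false_eq_true, if_neg, not_false_iff]
            rw [List.drop_left' (show (pvT3).length = 11 from rfl)]
          · -- no marker matches at this position
            rw [pvRepl_skip '(' pvT1 pvV1 _ _ h1]
            have hs2 : ¬ ('(' :: pvT2).isPrefixOf
                (c :: pvRepl '(' pvT1 pvV1 t) = true := by
              by_cases hc : c = '('
              · subst hc
                intro hpre
                have h' := List.isPrefixOf_iff_prefix.mp hpre
                rw [List.cons_prefix_cons] at h'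
                have h'' := (pvRepl_prefix_iff '(' pvT1 '*' pvU1 t
                  pvT2 (by intro c hc; fin_cases hc <;> decide)).mp h'.2
                exact h2 (List.isPrefixOf_iff_prefix.mpr (List.cons_prefix_cons.mpr ⟨rfl, h''⟩))
              · intro hpre
                have h' := List.isPrefixOf_iff_prefix.mp hpre
                rw [List.cons_prefix_cons] at h'
                exact hc h'.1.symm
            rw [pvRepl_skip '(' pvT2 pvV2 _ _ hs2]
            have hs3 : ¬ ('(' :: pvT3).isPrefixOf
                (c :: pvRepl '(' pvT2 pvV2
                  (pvRepl '(' pvT1 pvV1 t)) = true := by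
              by_cases hc : c = '('
              · subst hc
                intro hpre
                have h' := List.isPrefixOf_iff_prefix.mp hpre
                rw [List.cons_prefix_cons] at h'
                have h'' := (pvRepl_prefix_iff '(' pvT2 '*' pvU2
                  (pvRepl '(' pvT1 pvV1 t) pvT3 (by intro c hc; fin_cases hc <;> decide)).mp h'.2
                have h''' := (pvRepl_prefix_iff '(' pvT1 '*' pvU1 t
                  pvT3 (by intro c hc; fin_cases hc <;> decide)).mp h''
                exact h3 (List.isPrefixOf_iff_prefix.mpr (List.cons_prefix_cons.mpr ⟨rfl, h'''⟩))
              · intro hpre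
                have h' := List.isPrefixOf_iff_prefix.mp hpre
                rw [List.cons_prefix_cons] at h'
                exact hc h'.1.symm
            rw [pvRepl_skip '(' pvT3 pvV3 _ _ hs3]
            rw [ih t (by simp at hl ⊢; omega)]
            rw [pvScan]
            simp only [h1, h2, h3, Bool.false_eq_true, if_neg, not_false_iff]

-- ===== VERDICT (by name: the statement is the Claim_ definition above) =====
theorem normalizar_marcadores_spec : Claim_equal_normalizar_marcadores := by
  intro texto _
  show normalizar_marcadores texto = normalizar_marcadores_alt texto
  have hA : normalizar_marcadores texto =
      PySem.Str.replace (PySem.Str.replace (PySem.Str.replace texto "(pais)" "*pais*")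
        "(capital)" "*capital*") "(continente)" "*continente*" := rfl
  rw [hA]
  unfold normalizar_marcadores_alt
  rw [show ∀ s o n : String, PySem.Str.replace s o n =
        String.ofList (PySem.Chars.replace s.toList o.toList n.toList) from fun _ _ _ => rfl]
  simp only [PySem.Str.toList_replace]
  congr 1
  rw [show "(pais)".toList = '(' :: pvT1 from rfl, show "*pais*".toList = pvV1 from rfl,
      show "(capital)".toList = '(' :: pvT2 from rfl, show "*capital*".toList = pvV2 from rfl,
      show "(continente)".toList = '(' :: pvT3 from rfl,
      show "*continente*".toList = pvV3 from rfl]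
  rw [replace_eq_pvRepl, replace_eq_pvRepl, replace_eq_pvRepl]
  exact pvChain_eq_pvScan texto.toList.length texto.toList le_rfl
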